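-- pv_equiv track=rewrite | github.com/nabetama-training/CompetitionProgrammingPractice | src/atcoder/tasks/arc065_a.py | f
-- ===== SOURCE A (Python) =====
-- from typing import Tuple
--
-- def removeIfFound(target: str, needle: str) -> Tuple[bool, str]:
--     if target.find(needle) < 0:
--         return False, target
--     return True, target.replace(needle, '')
--
-- def f(s: str, words: [str]) -> bool:
--     if s == '':
--         return True
--     for word in words:
--         ok, ret = removeIfFound(s, word)
--         if ok:
--             return f(ret, words)
--     return False
-- ===== SOURCE B (Python) =====
-- def f(s: str, words: [str]) -> bool:
--     cur = s
--     while cur != '':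
--         for word in words:
--             if word in cur:
--                 cur = cur.replace(word, '')
--                 break
--         else:
--             return False
--     return True
-- ===== Notes on version B (the rewrite author's own statement) =====
-- stated objective: idiomatic
-- what changed: The tail recursion with a tuple-returning helper is replaced by a flat iterative while-loop that scans for the first matching word, replaces it and restarts; no recursion and no helper.
-- outside the precondition, e.g. on f('a', ['a', '']): A returns True, B returns True; on f('a', ['', 'a']): A raises RecursionError, B does not finish within the time limit
import Mathlib
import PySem

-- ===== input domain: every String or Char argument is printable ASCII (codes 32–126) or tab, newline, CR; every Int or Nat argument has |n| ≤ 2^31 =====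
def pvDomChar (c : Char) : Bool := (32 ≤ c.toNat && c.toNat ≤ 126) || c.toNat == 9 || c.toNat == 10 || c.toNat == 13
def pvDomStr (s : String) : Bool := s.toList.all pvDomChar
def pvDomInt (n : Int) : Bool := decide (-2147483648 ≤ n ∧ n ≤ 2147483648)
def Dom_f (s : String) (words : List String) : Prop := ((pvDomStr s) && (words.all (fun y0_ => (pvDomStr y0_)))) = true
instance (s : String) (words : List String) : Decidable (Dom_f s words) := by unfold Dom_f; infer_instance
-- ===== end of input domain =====

-- B rewrites A's tail recursion as a flat iterative while-loop (first matching word, replace-all, restart); return values proved equal on Pre_.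

-- ===== PORT A =====
def removeIfFound (target needle : String) : Bool × String :=
  if PySem.Str.find target needle < 0 then (false, target)
  else (true, PySem.Str.replace target needle "")

-- A's for-loop over words: on the first ok it returns the recursive call on the reduced string
def fScan (rec : String → Bool) (s : String) : List String → Bool
  | [] => false
  | w :: ws =>
    let p := removeIfFound s w
    if p.1 then rec p.2 else fScan rec s ws

-- fuel guard only (A's recursion; |s| + 1 steps suffice whenever Python A returns)
def fFuel : Nat → String → List String → Bool
  | 0, _, _ => false
  | n + 1, s, words => if s = "" then true else fScan (fun r => fFuel n r words) s words

def f (s : String) (words : List String) : Bool := fFuel (s.length + 1) s words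

-- ===== PORT B =====
-- the inner for-scan of Source B: first word contained in cur, with its replacement (none = for-else)
def fAltStep (cur : String) : List String → Option String
  | [] => none
  | w :: ws => if PySem.Str.isIn w cur then some (PySem.Str.replace cur w "") else fAltStep cur ws

-- the while-loop of Source B, with the same fuel guard
def fAltLoop : Nat → String → List String → Bool
  | 0, _, _ => false
  | n + 1, cur, words =>
    if cur = "" then true
    else match fAltStep cur words with
      | some next => fAltLoop n next words
      | none => false

def f_alt (s : String) (words : List String) : Bool := fAltLoop (s.length + 1) s words

-- ===== PRECONDITION & SPEC =====
-- Pre_ excludes a nonempty s together with a words list containing the empty string: there replacing '' leaves s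
-- unchanged, so A can recurse forever (RecursionError) and B's loop can spin forever; where A happens to return
-- (an earlier word always matches) B returns the same value.
def Pre_f (s : String) (words : List String) : Prop := s = "" ∨ "" ∉ words
instance (s : String) (words : List String) : Decidable (Pre_f s words) := by unfold Pre_f; infer_instance
def pvWitness_f : String × List String := ("abab", ["c", "ab"])
def Spec_f (s : String) (words : List String) (out : Bool) : Prop := out = f_alt s words
instance (s : String) (words : List String) (out : Bool) : Decidable (Spec_f s words out) := by unfold Spec_f; infer_instance

-- ===== CLAIM (what is proved, stated in full; the proofs are below) =====
def Claim_equal_f : Prop := ∀ (s : String) (words : List String), Dom_f s words → Pre_f s words → Spec_f s words (f s words)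

-- ===== LEMMAS AND PROOFS =====

-- removeIfFound, characterised via membership (find ≥ 0 iff the needle occurs)
theorem removeIfFound_eq (s w : String) :
    removeIfFound s w =
      if PySem.Str.isIn w s then (true, PySem.Str.replace s w "") else (false, s) := by
  unfold removeIfFound
  by_cases hin : PySem.Str.isIn w s = true
  · have h0 : (0 : Int) ≤ PySem.Str.find s w :=
      (PySem.Str.find_nonneg_iff _ _).mpr ((PySem.Str.isIn_iff_infix _ _).mp hin)
    rw [if_neg (by omega), if_pos hin]
  · have h1 : PySem.Str.find s w < 0 := by
      by_contra hc
      exact hin ((PySem.Str.isIn_iff_infix _ _).mpr ((PySem.Str.find_nonneg_iff _ _).mp (by omega)))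
    rw [if_pos h1, if_neg hin]

-- the two inner scans agree: A's first-ok loop is B's first-match step fed to the continuation
theorem fScan_eq_step (rec : String → Bool) (s : String) (ws : List String) :
    fScan rec s ws = match fAltStep s ws with
      | some r => rec r
      | none => false := by
  induction ws with
  | nil => rfl
  | cons w ws ih =>
    simp only [fScan, fAltStep, removeIfFound_eq s w]
    cases hin : PySem.Str.isIn w s
    · simp [ih]
    · simp

-- same fuel, same step: the two loops coincide for every fuel value
theorem fFuel_eq_fAltLoop (n : Nat) : ∀ (s : String) (words : List String),
    fFuel n s words = fAltLoop n s words := by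
  induction n with
  | zero => intro s words; rfl
  | succ n ih =>
    intro s words
    simp only [fFuel, fAltLoop]
    by_cases hs : s = ""
    · simp [hs]
    · simp only [hs, fScan_eq_step]
      cases fAltStep s words with
      | none => rfl
      | some r => simp [ih]

-- ===== VERDICT (by name: the statement is the Claim_ definition above) =====
theorem f_spec : Claim_equal_f := by
  intro s words _ _
  unfold Spec_f f f_alt
  exact fFuel_eq_fAltLoop _ s words
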